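-- pv_equiv track=rewrite | github.com/fescofesco/CCC | CCC/Challenge 2024/level5/input_parse_flvl5.py | has_adjacent_desk
-- ===== SOURCE A (Python) =====
-- def has_adjacent_desk(matrix, i, j, x, y, desk_cells):
--     """Check if any adjacent cells (including diagonally) have a desk."""
--     for ci, cj in desk_cells:
--         for ni in range(ci - 1, ci + 2):
--             for nj in range(cj - 1, cj + 2):
--                 if (ni, nj) == (ci, cj):
--                     continue
--                 if 0 <= ni < y and 0 <= nj < x:
--                     if matrix[ni][nj] == 'X':
--                         return True
--     return False
-- ===== SOURCE B (Python) =====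
-- def has_adjacent_desk(matrix, i, j, x, y, desk_cells):
--     """Check if any adjacent cells (including diagonally) have a desk."""
--     desks = set(desk_cells)
--     for ni in range(min(y, len(matrix))):
--         row = matrix[ni]
--         for nj in range(min(x, len(row))):
--             if row[nj] == 'X':
--                 for di in (-1, 0, 1):
--                     for dj in (-1, 0, 1):
--                         if (di, dj) != (0, 0) and (ni + di, nj + dj) in desks:
--                             return True
--     return False
-- ===== Notes on version B (the rewrite author's own statement) =====
-- stated objective: alternative
-- what changed: Inverts the traversal: instead of scanning the 8-neighbourhood of every desk cell for 'X', B builds a set of the desk cells once, scans the grid (clipped to the y*x gate and the matrix's actual extent) for 'X' cells and tests each one's 8 neighbours for membership in that set.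
-- outside the precondition, e.g. on has_adjacent_desk([['.', 'X']], 0, 0, 2, 2, [(0, 0)]): A returns True, B returns True
import Mathlib
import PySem

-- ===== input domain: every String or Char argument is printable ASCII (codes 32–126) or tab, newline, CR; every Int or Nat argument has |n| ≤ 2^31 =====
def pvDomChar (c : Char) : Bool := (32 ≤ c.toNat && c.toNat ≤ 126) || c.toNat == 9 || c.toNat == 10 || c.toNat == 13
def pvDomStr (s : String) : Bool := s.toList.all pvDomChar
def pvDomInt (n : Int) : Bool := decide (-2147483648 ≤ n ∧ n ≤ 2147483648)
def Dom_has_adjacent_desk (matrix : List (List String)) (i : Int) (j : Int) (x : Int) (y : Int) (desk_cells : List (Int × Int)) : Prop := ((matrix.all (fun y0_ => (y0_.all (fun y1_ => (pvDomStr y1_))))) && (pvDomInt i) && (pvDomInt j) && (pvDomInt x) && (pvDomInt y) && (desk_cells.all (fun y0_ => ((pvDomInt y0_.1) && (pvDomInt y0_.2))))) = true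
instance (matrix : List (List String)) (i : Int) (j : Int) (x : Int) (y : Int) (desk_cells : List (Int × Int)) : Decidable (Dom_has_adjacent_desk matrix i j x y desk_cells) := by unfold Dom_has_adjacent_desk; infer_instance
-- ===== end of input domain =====

-- B inverts the traversal (scan the grid's 'X' cells and test a desk-cell set) instead of
-- scanning each desk cell's neighbourhood for 'X'; equivalence is on the return value only.

-- ===== PORT A =====
-- early `return True` inside the nested for-loops is `List.any`
def has_adjacent_desk (matrix : List (List String)) (i : Int) (j : Int) (x : Int) (y : Int) (desk_cells : List (Int × Int)) : Bool :=
  desk_cells.any (fun c =>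
    (PySem.List.pyRange (c.1 - 1) (c.1 + 2) 1).any (fun ni =>
      (PySem.List.pyRange (c.2 - 1) (c.2 + 2) 1).any (fun nj =>
        if (ni, nj) = (c.1, c.2) then false
        else if 0 ≤ ni ∧ ni < y ∧ 0 ≤ nj ∧ nj < x then
          -- matrix[ni][nj] == 'X'; Pre_ guarantees both indexings succeed here
          ((PySem.List.pyGet? matrix ni).bind (fun row => PySem.List.pyGet? row nj)) == some "X"
        else false)))

-- ===== PORT B =====
def has_adjacent_desk_alt (matrix : List (List String)) (i : Int) (j : Int) (x : Int) (y : Int) (desk_cells : List (Int × Int)) : Bool :=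
  let desks := PySem.Set.ofList desk_cells
  (PySem.List.pyRange 0 (min y (PySem.List.len matrix)) 1).any (fun ni =>
    let row := PySem.List.pyGetD matrix ni []   -- in range by the loop bound
    (PySem.List.pyRange 0 (min x (PySem.List.len row)) 1).any (fun nj =>
      if PySem.List.pyGetD row nj "" == "X" then
        ([-1, 0, 1] : List Int).any (fun di =>
          ([-1, 0, 1] : List Int).any (fun dj =>
            decide ((di, dj) ≠ ((0 : Int), (0 : Int))) && PySem.Set.contains desks (ni + di, nj + dj)))
      else false))

-- ===== PRECONDITION & SPEC =====
-- Pre_ excludes inputs where some desk cell has an in-gate neighbour (0 ≤ ni < y, 0 ≤ nj < x)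
-- outside the matrix's actual extent: there A's matrix[ni][nj] raises IndexError — except when an
-- earlier neighbour was already 'X' and A returned True first; that early-exit sliver is excluded too.
def Pre_has_adjacent_desk (matrix : List (List String)) (i : Int) (j : Int) (x : Int) (y : Int) (desk_cells : List (Int × Int)) : Prop :=
  ∀ c ∈ desk_cells, ∀ di ∈ ([-1, 0, 1] : List Int), ∀ dj ∈ ([-1, 0, 1] : List Int),
    ¬(di = 0 ∧ dj = 0) → 0 ≤ c.1 + di → c.1 + di < y → 0 ≤ c.2 + dj → c.2 + dj < x →
      c.1 + di < (matrix.length : Int) ∧ c.2 + dj < ((matrix.getD (c.1 + di).toNat []).length : Int)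
instance (matrix : List (List String)) (i : Int) (j : Int) (x : Int) (y : Int) (desk_cells : List (Int × Int)) : Decidable (Pre_has_adjacent_desk matrix i j x y desk_cells) := by unfold Pre_has_adjacent_desk; infer_instance

def pvWitness_has_adjacent_desk : List (List String) × Int × Int × Int × Int × (List (Int × Int)) :=
  ([["X", "."], [".", "."]], 0, 0, 2, 2, [(1, 1)])

def Spec_has_adjacent_desk (matrix : List (List String)) (i : Int) (j : Int) (x : Int) (y : Int) (desk_cells : List (Int × Int)) (out : Bool) : Prop := out = has_adjacent_desk_alt matrix i j x y desk_cells
instance (matrix : List (List String)) (i : Int) (j : Int) (x : Int) (y : Int) (desk_cells : List (Int × Int)) (out : Bool) : Decidable (Spec_has_adjacent_desk matrix i j x y desk_cells out) := by unfold Spec_has_adjacent_desk; infer_instance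

-- ===== CLAIM (what is proved, stated in full; the proofs are below) =====
def Claim_equal_has_adjacent_desk : Prop := ∀ (matrix : List (List String)) (i : Int) (j : Int) (x : Int) (y : Int) (desk_cells : List (Int × Int)), Dom_has_adjacent_desk matrix i j x y desk_cells → Pre_has_adjacent_desk matrix i j x y desk_cells → Spec_has_adjacent_desk matrix i j x y desk_cells (has_adjacent_desk matrix i j x y desk_cells)

-- ===== LEMMAS AND PROOFS =====

theorem has_adjacent_desk_iff (matrix : List (List String)) (i j x y : Int) (ds : List (Int × Int)) :
    has_adjacent_desk matrix i j x y ds = true ↔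
      ∃ c ∈ ds, ∃ ni, (c.1 - 1 ≤ ni ∧ ni < c.1 + 2) ∧ ∃ nj, (c.2 - 1 ≤ nj ∧ nj < c.2 + 2) ∧
        ¬(ni = c.1 ∧ nj = c.2) ∧ (0 ≤ ni ∧ ni < y ∧ 0 ≤ nj ∧ nj < x) ∧
        ((PySem.List.pyGet? matrix ni).bind (fun row => PySem.List.pyGet? row nj)) = some "X" := by
  simp [has_adjacent_desk, List.any_eq_true, PySem.List.mem_pyRange_one, Prod.ext_iff]
  constructor <;>
    (rintro ⟨a, b, h1, n1, hn1, n2, hn2, h3, h4, h5⟩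
     exact ⟨a, b, h1, n1, hn1, n2, hn2, by tauto, h4, h5⟩)

theorem has_adjacent_desk_alt_iff (matrix : List (List String)) (i j x y : Int) (ds : List (Int × Int)) :
    has_adjacent_desk_alt matrix i j x y ds = true ↔
      ∃ ni, (0 ≤ ni ∧ ni < min y (matrix.length : Int)) ∧
        ∃ nj, (0 ≤ nj ∧ nj < min x ((PySem.List.pyGetD matrix ni []).length : Int)) ∧
          PySem.List.pyGetD (PySem.List.pyGetD matrix ni []) nj "" = "X" ∧
          ∃ di ∈ ([-1, 0, 1] : List Int), ∃ dj ∈ ([-1, 0, 1] : List Int),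
            ¬(di = 0 ∧ dj = 0) ∧ (ni + di, nj + dj) ∈ ds := by
  simp [has_adjacent_desk_alt, List.any_eq_true, PySem.List.mem_pyRange_one, Prod.ext_iff]

-- ===== VERDICT (by name: the statement is the Claim_ definition above) =====
theorem has_adjacent_desk_spec : Claim_equal_has_adjacent_desk := by
  intro matrix i j x y ds _hDom hPre
  unfold Spec_has_adjacent_desk
  rw [Bool.eq_iff_iff, has_adjacent_desk_iff, has_adjacent_desk_alt_iff]
  constructor
  · rintro ⟨c, hc, ni, ⟨h1, h2⟩, nj, ⟨h3, h4⟩, hne, ⟨hni0, hniy, hnj0, hnjx⟩, hget⟩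
    obtain ⟨row, hrow, hcell⟩ : ∃ row, PySem.List.pyGet? matrix ni = some row ∧
        PySem.List.pyGet? row nj = some "X" := by
      cases h : PySem.List.pyGet? matrix ni with
      | none => simp [h] at hget
      | some r => exact ⟨r, rfl, by simpa [h] using hget⟩
    rw [PySem.List.pyGet?_of_nonneg matrix hni0] at hrow
    obtain ⟨hlt, hrowv⟩ := List.getElem?_eq_some_iff.mp hrow
    rw [PySem.List.pyGet?_of_nonneg row hnj0] at hcell
    obtain ⟨hlt2, hcellv⟩ := List.getElem?_eq_some_iff.mp hcell
    have hltZ : ni < (matrix.length : Int) := by omega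
    have hrowD : PySem.List.pyGetD matrix ni [] = row := by
      rw [PySem.List.pyGetD_eq_getElem matrix [] hni0 (by simpa using hltZ)]; exact hrowv
    have hlt2Z : nj < (row.length : Int) := by omega
    refine ⟨ni, ⟨hni0, lt_min hniy hltZ⟩, nj, ⟨hnj0, ?_⟩, ?_, c.1 - ni, ?_, c.2 - nj, ?_, ?_, ?_⟩
    · rw [hrowD]; exact lt_min hnjx hlt2Z
    · rw [hrowD, PySem.List.pyGetD_eq_getElem _ "" hnj0 (by simpa using hlt2Z)]; exact hcellv
    · have : c.1 - ni = -1 ∨ c.1 - ni = 0 ∨ c.1 - ni = 1 := by omega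
      rcases this with h | h | h <;> simp [h]
    · have : c.2 - nj = -1 ∨ c.2 - nj = 0 ∨ c.2 - nj = 1 := by omega
      rcases this with h | h | h <;> simp [h]
    · rintro ⟨ha, hb⟩; exact hne ⟨by omega, by omega⟩
    · have hcc : ((ni + (c.1 - ni), nj + (c.2 - nj)) : Int × Int) = c := by
        obtain ⟨c1, c2⟩ := c; simp
      rw [hcc]; exact hc
  · rintro ⟨ni, ⟨hni0, hniM⟩, nj, ⟨hnj0, hnjM⟩, hcell, di, hdi, dj, hdj, hne, hmem⟩
    have hdi' : di = -1 ∨ di = 0 ∨ di = 1 := by simpa using hdi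
    have hdj' : dj = -1 ∨ dj = 0 ∨ dj = 1 := by simpa using hdj
    have hniy := lt_min_iff.mp hniM
    have hnjx := lt_min_iff.mp hnjM
    have hrowD : PySem.List.pyGetD matrix ni [] = matrix[ni.toNat] := by
      exact PySem.List.pyGetD_eq_getElem matrix [] hni0 (by simpa using hniy.2)
    rw [hrowD] at hcell hnjx
    refine ⟨(ni + di, nj + dj), hmem, ni, ⟨by omega, by omega⟩, nj, ⟨by omega, by omega⟩,
      ?_, ⟨hni0, hniy.1, hnj0, hnjx.1⟩, ?_⟩
    · rintro ⟨ha, hb⟩; exact hne ⟨by omega, by omega⟩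
    · rw [PySem.List.pyGet?_of_nonneg matrix hni0, List.getElem?_eq_some_iff.mpr
        ⟨by omega, rfl⟩]
      simp only [Option.bind_some]
      rw [PySem.List.pyGet?_of_nonneg _ hnj0]
      rw [List.getElem?_eq_some_iff.mpr ⟨by omega, ?_⟩]
      rw [← PySem.List.pyGetD_eq_getElem _ "" hnj0 (by simpa using hnjx.2)]
      exact hcell
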